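-- pv_equiv track=rewrite | github.com/Oumayma-O/chem-tutor-backend | app/utils/markdown_sanitizer.py | _skip_balanced_braces
-- ===== SOURCE A (Python) =====
-- def _skip_balanced_braces(s: str, i: int) -> int:
--     if i >= len(s) or s[i] != "{":
--         return i
--     depth = 0
--     k = i
--     while k < len(s):
--         if s[k] == "{":
--             depth += 1
--         elif s[k] == "}":
--             depth -= 1
--             if depth == 0:
--                 return k + 1
--         k += 1
--     return len(s)
-- ===== SOURCE B (Python) =====
-- def _skip_balanced_braces(s: str, i: int) -> int:
--     if i >= len(s) or s[i] != "{":
--         return i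
--     k = i + 1
--     while k < len(s):
--         c = s[k]
--         if c == "{":
--             k = _skip_balanced_braces(s, k)
--         elif c == "}":
--             return k + 1
--         else:
--             k += 1
--     return len(s)
-- ===== Notes on version B (the rewrite author's own statement) =====
-- stated objective: alternative
-- what changed: Replaces the flat depth-counter while loop with recursive descent: on a nested '{' the function calls itself to jump past the inner group, on '}' it returns, so no depth variable is maintained.
import Mathlib
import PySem

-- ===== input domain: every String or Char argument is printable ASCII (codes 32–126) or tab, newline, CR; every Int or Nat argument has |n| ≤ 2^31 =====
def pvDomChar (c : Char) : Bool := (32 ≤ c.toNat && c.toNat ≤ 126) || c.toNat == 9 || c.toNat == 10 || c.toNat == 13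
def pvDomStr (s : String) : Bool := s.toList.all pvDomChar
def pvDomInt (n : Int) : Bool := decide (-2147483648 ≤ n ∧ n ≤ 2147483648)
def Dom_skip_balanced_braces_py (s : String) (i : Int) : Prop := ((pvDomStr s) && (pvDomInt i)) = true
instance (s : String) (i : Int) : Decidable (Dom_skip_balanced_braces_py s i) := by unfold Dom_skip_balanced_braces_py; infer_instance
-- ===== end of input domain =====

-- B replaces A's flat depth-counter loop with recursive descent over the nested brace structure (same cost; equivalence proved on Pre_).


-- ===== PORT A =====
-- A's while loop: k scans forward maintaining depth; returns k+1 when depth hits 0, else len(s).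
def loopA (cs : List Char) (depth k : Int) : Int :=
  if h : k < (cs.length : Int) then
    if PySem.List.pyGet? cs k = some '{' then loopA cs (depth + 1) (k + 1)
    else if PySem.List.pyGet? cs k = some '}' then
      (if depth - 1 = 0 then k + 1 else loopA cs (depth - 1) (k + 1))
    else loopA cs depth (k + 1)
  else (cs.length : Int)
termination_by ((cs.length : Int) - k).toNat
decreasing_by all_goals omega

def skip_balanced_braces_py (s : String) (i : Int) : Int :=
  let cs := s.toList
  if (cs.length : Int) ≤ i ∨ PySem.List.pyGet? cs i ≠ some '{' then i
  else loopA cs 0 i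

-- ===== PORT B =====
-- B's recursion, with a fuel guard for totality only (fuel is chosen provably sufficient below).
mutual
def bAlt (cs : List Char) (fuel : Nat) (i : Int) : Int :=
  match fuel with
  | 0 => i
  | f + 1 =>
    if (cs.length : Int) ≤ i ∨ PySem.List.pyGet? cs i ≠ some '{' then i
    else bLoop cs f (i + 1)

def bLoop (cs : List Char) (fuel : Nat) (k : Int) : Int :=
  match fuel with
  | 0 => (cs.length : Int)
  | f + 1 =>
    if k < (cs.length : Int) then
      if PySem.List.pyGet? cs k = some '{' then bLoop cs f (bAlt cs f k)
      else if PySem.List.pyGet? cs k = some '}' then k + 1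
      else bLoop cs f (k + 1)
    else (cs.length : Int)
end

def skip_balanced_braces_py_alt (s : String) (i : Int) : Int :=
  bAlt s.toList (2 * (((s.toList.length : Int)) - i).toNat + 2) i

-- ===== PRECONDITION & SPEC =====
-- Pre_ excludes exactly the inputs i < -len(s), on which A (and B) raise IndexError.
def Pre_skip_balanced_braces_py (s : String) (i : Int) : Prop :=
  -((s.toList.length : Int)) ≤ i
instance (s : String) (i : Int) : Decidable (Pre_skip_balanced_braces_py s i) := by
  unfold Pre_skip_balanced_braces_py; infer_instance

def pvWitness_skip_balanced_braces_py : String × Int := ("{a{b}c}", 0)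

def Spec_skip_balanced_braces_py (s : String) (i : Int) (out : Int) : Prop := out = skip_balanced_braces_py_alt s i
instance (s : String) (i : Int) (out : Int) : Decidable (Spec_skip_balanced_braces_py s i out) := by unfold Spec_skip_balanced_braces_py; infer_instance

-- ===== CLAIM (what is proved, stated in full; the proofs are below) =====
def Claim_equal_skip_balanced_braces_py : Prop := ∀ (s : String) (i : Int), Dom_skip_balanced_braces_py s i → Pre_skip_balanced_braces_py s i → Spec_skip_balanced_braces_py s i (skip_balanced_braces_py s i)

-- ===== LEMMAS AND PROOFS =====

theorem loopA_of_ge (cs : List Char) (d k : Int) (h : (cs.length : Int) ≤ k) :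
    loopA cs d k = (cs.length : Int) := by
  rw [loopA]; simp [not_lt.mpr h]

theorem loopA_ub (cs : List Char) (d k : Int) : loopA cs d k ≤ (cs.length : Int) := by
  by_cases h : k < (cs.length : Int)
  · rw [loopA]
    simp only [h, dif_pos]
    split_ifs with h1 h2 h3
    · exact loopA_ub cs (d+1) (k+1)
    · omega
    · exact loopA_ub cs (d-1) (k+1)
    · exact loopA_ub cs d (k+1)
  · rw [loopA]; simp [h]
termination_by ((cs.length : Int) - k).toNat
decreasing_by all_goals omega

theorem loopA_lb (cs : List Char) (d k : Int) (h : k < (cs.length : Int)) :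
    k + 1 ≤ loopA cs d k := by
  rw [loopA]
  simp only [h, dif_pos]
  have step : ∀ d', k + 1 ≤ loopA cs d' (k + 1) := by
    intro d'
    by_cases h2 : k + 1 < (cs.length : Int)
    · have := loopA_lb cs d' (k+1) h2; omega
    · rw [loopA_of_ge cs d' (k+1) (by omega)]; omega
  split_ifs with h1 h2 h3
  · exact step _
  · omega
  · exact step _
  · exact step _
termination_by ((cs.length : Int) - k).toNat
decreasing_by all_goals omega

-- depth collapsing: with d+2 groups open (d ≥ 0), first close one (loopA 1), then continue with d+1 open.
theorem loopA_collapse (cs : List Char) (m : Nat) :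
    ∀ (k : Int) (d : Int), 0 ≤ d → ((cs.length : Int) - k).toNat ≤ m →
      loopA cs (d + 2) k = loopA cs (d + 1) (loopA cs 1 k) := by
  induction m with
  | zero =>
    intro k d _hd hm
    have hk : (cs.length : Int) ≤ k := by omega
    rw [loopA_of_ge cs _ k hk, loopA_of_ge cs 1 k hk, loopA_of_ge cs _ _ le_rfl]
  | succ m ih =>
    intro k d hd hm
    by_cases hk : k < (cs.length : Int)
    · by_cases h1 : PySem.List.pyGet? cs k = some '{'
      · -- LHS steps to loopA (d+3) (k+1); RHS inner loopA 1 k steps to loopA 2 (k+1)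
        have hS : loopA cs 1 k = loopA cs 2 (k + 1) := by
          conv_lhs => rw [loopA]
          simp [hk, h1]
        have e2 : loopA cs 2 (k + 1) = loopA cs 1 (loopA cs 1 (k + 1)) := by
          have := ih (k + 1) 0 le_rfl (by omega)
          norm_num at this
          exact this
        have e1 : loopA cs (d + 3) (k + 1) = loopA cs (d + 2) (loopA cs 1 (k + 1)) := by
          have := ih (k + 1) (d + 1) (by omega) (by omega)
          have h31 : d + 1 + 2 = d + 3 := by ring
          have h21 : d + 1 + 1 = d + 2 := by ring
          rw [h31, h21] at this
          exact this
        conv_lhs => rw [loopA]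
        simp only [hk, dif_pos, h1, if_pos]
        have h32 : d + 2 + 1 = d + 3 := by ring
        rw [h32, e1, hS, e2]
        by_cases h2 : (k + 1) < (cs.length : Int)
        · have hge := loopA_lb cs 1 (k + 1) h2
          have hub := loopA_ub cs 1 (k + 1)
          exact ih (loopA cs 1 (k + 1)) d hd (by omega)
        · have hn : loopA cs 1 (k + 1) = (cs.length : Int) := loopA_of_ge cs 1 (k + 1) (by omega)
          rw [hn, loopA_of_ge cs (d + 2) _ le_rfl, loopA_of_ge cs 1 _ le_rfl,
              loopA_of_ge cs (d + 1) _ le_rfl]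
      · by_cases h2 : PySem.List.pyGet? cs k = some '}'
        · -- LHS: depth d+2-1 = d+1 ≠ 0 → loopA (d+1) (k+1); RHS: loopA 1 k = k+1
          have hS : loopA cs 1 k = k + 1 := by
            rw [loopA]
            simp [hk, h2]
          rw [hS]
          conv_lhs => rw [loopA]
          have hdd : d + 2 - 1 = d + 1 := by ring
          rw [dif_pos hk, if_neg h1, if_pos h2, if_neg (by omega : ¬(d + 2 - 1 = 0)), hdd]
        · have hS : loopA cs 1 k = loopA cs 1 (k + 1) := by
            conv_lhs => rw [loopA]
            simp [hk, h1, h2]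
          rw [hS]
          conv_lhs => rw [loopA]
          rw [dif_pos hk, if_neg h1, if_neg h2]
          exact ih (k + 1) d hd (by omega)
    · rw [loopA_of_ge cs _ k (by omega), loopA_of_ge cs 1 k (by omega),
          loopA_of_ge cs _ _ le_rfl]

-- fuel lemma: with sufficient fuel, B's loop computes A's loop at depth 1.
theorem bLoop_eq (cs : List Char) (f : Nat) :
    ∀ (k : Int), -((cs.length : Int)) ≤ k → 2 * (((cs.length : Int)) - k).toNat ≤ f →
      bLoop cs f k = loopA cs 1 k := by
  induction f using Nat.strong_induction_on with
  | _ f ih =>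
    intro k hk hf
    match f with
    | 0 =>
      have : (cs.length : Int) ≤ k := by omega
      rw [bLoop, loopA_of_ge cs 1 k this]
    | f + 1 =>
      by_cases hlt : k < (cs.length : Int)
      · rw [bLoop]
        simp only [hlt, if_pos]
        by_cases h1 : PySem.List.pyGet? cs k = some '{'
        · simp only [h1, if_pos]
          obtain ⟨f', rfl⟩ : ∃ f', f = f' + 1 := ⟨f - 1, by omega⟩
          have hguard : ¬((cs.length : Int) ≤ k ∨ PySem.List.pyGet? cs k ≠ some '{') := by
            rw [not_or]
            exact ⟨not_le.mpr hlt, by simp [h1]⟩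
          have ealt : bAlt cs (f' + 1) k = loopA cs 1 (k + 1) := by
            rw [bAlt, if_neg hguard]
            exact ih f' (by omega) (k + 1) (by omega) (by omega)
          rw [ealt]
          have hrest : bLoop cs (f' + 1) (loopA cs 1 (k + 1)) = loopA cs 1 (loopA cs 1 (k + 1)) := by
            by_cases h2 : k + 1 < (cs.length : Int)
            · have hlb := loopA_lb cs 1 (k + 1) h2
              have hub := loopA_ub cs 1 (k + 1)
              exact ih (f' + 1) (by omega) _ (by omega) (by omega)
            · have hn : loopA cs 1 (k + 1) = (cs.length : Int) := loopA_of_ge cs 1 (k + 1) (by omega)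
              rw [hn, bLoop, loopA_of_ge cs 1 _ le_rfl]
              simp
          rw [hrest]
          have hstep : loopA cs 1 k = loopA cs 2 (k + 1) := by
            conv_lhs => rw [loopA]
            simp [hlt, h1]
          rw [hstep]
          have := loopA_collapse cs (((cs.length : Int) - (k + 1)).toNat) (k + 1) 0 le_rfl le_rfl
          norm_num at this
          exact this.symm
        · by_cases h2 : PySem.List.pyGet? cs k = some '}'
          · rw [if_neg h1, if_pos h2]
            rw [loopA]
            simp [hlt, h2]
          · rw [if_neg h1, if_neg h2]
            have hnext : bLoop cs f (k + 1) = loopA cs 1 (k + 1) :=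
              ih f (by omega) (k + 1) (by omega) (by omega)
            rw [hnext]
            conv_rhs => rw [loopA]
            simp [hlt, h1, h2]
      · rw [bLoop, if_neg hlt, loopA_of_ge cs 1 k (by omega)]

-- ===== VERDICT (by name: the statement is the Claim_ definition above) =====
theorem skip_balanced_braces_py_spec : Claim_equal_skip_balanced_braces_py := by
  intro s i _hdom hpre
  unfold Spec_skip_balanced_braces_py skip_balanced_braces_py skip_balanced_braces_py_alt
  simp only []
  set cs := s.toList with hcs
  have hpre' : -((cs.length : Int)) ≤ i := hpre
  by_cases hg : (cs.length : Int) ≤ i ∨ PySem.List.pyGet? cs i ≠ some '{'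
  · rw [if_pos hg, bAlt]
    rw [if_pos hg]
  · rw [if_neg hg, bAlt, if_neg hg]
    rw [not_or, not_le, not_not] at hg
    obtain ⟨hlt, heq⟩ := hg
    have hlt' : i < (cs.length : Int) := by omega
    have hA : loopA cs 0 i = loopA cs 1 (i + 1) := by
      rw [loopA]; simp [hlt', heq]
    rw [hA]
    exact (bLoop_eq cs _ (i+1) (by omega) (by omega)).symm
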